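-- pv_equiv track=rewrite | github.com/CabbageLab/AlgoScripts | Python3_Basis/shortUrl/hashAndBloom.py | decimal_to_base62
-- ===== SOURCE A (Python) =====
-- def decimal_to_base62(num):
--     chars = "0123456789ABCDEFGHIJKLMNOPQRSTUVWXYZabcdefghijklmnopqrstuvwxyz"
--     if num == 0:
--         return chars[0]
--     base62 = []
--     while num > 0:
--         num, remainder = divmod(num, 62)
--         base62.append(chars[remainder])
--     return ''.join(reversed(base62))
-- ===== SOURCE B (Python) =====
-- def decimal_to_base62(num):
--     chars = "0123456789ABCDEFGHIJKLMNOPQRSTUVWXYZabcdefghijklmnopqrstuvwxyz"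
--     if num <= 0:
--         return chars[0] if num == 0 else ''
--     k = 0
--     while 62 ** k <= num:
--         k += 1
--     return ''.join(chars[(num // 62 ** (k - 1 - i)) % 62] for i in range(k))
-- ===== Notes on version B (the rewrite author's own statement) =====
-- stated objective: alternative
-- what changed: Replaced the divmod loop that collects digits least-significant-first into a list and reverses it by first counting the number of digits k with a power comparison loop, then extracting each digit positionally most-significant-first as (num // 62**(k-1-i)) % 62 with no digit list and no reversal.
import Mathlib
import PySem

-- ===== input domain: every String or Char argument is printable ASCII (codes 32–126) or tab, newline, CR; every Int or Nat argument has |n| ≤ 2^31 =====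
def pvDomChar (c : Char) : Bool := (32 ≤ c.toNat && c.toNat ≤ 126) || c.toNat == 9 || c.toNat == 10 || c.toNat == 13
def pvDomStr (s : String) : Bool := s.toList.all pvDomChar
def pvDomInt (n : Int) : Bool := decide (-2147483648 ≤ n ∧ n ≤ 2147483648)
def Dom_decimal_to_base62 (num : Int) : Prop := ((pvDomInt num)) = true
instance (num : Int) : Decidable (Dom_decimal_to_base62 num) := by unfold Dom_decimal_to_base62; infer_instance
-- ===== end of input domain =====

-- B replaces A's divmod loop (LSB-first digit list, then reverse) by first counting the
-- digits k and then extracting each digit positionally as (num // 62^(k-1-i)) % 62,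
-- MSB-first, with no digit list and no reversal (objective: alternative).

-- ===== PORT A =====
-- the 62-character alphabet (chars in the Python)
def pvChars62 : List Char := "0123456789ABCDEFGHIJKLMNOPQRSTUVWXYZabcdefghijklmnopqrstuvwxyz".toList

-- chars[r]; in both ports r is a `% 62` value in [0,62) so pyGet? is always some (getD never fires)
def pvDigit (r : Int) : Char := (PySem.List.pyGet? pvChars62 r).getD '0'

-- the while loop of A: append chars[remainder], continue with num // 62
def pvALoop (num : Int) (acc : List Char) : List Char :=
  if num > 0 then
    pvALoop (PySem.Int.floordiv num 62) (acc ++ [pvDigit (PySem.Int.mod num 62)])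
  else acc
termination_by num.toNat
decreasing_by
  rename_i h
  have h2 : PySem.Int.floordiv num 62 = num / 62 := PySem.Int.floordiv_eq_ediv_of_pos (by omega)
  rw [h2]
  omega

def decimal_to_base62 (num : Int) : String :=
  if num = 0 then String.ofList [pvChars62.headI]
  else String.ofList (pvALoop num []).reverse

-- ===== PORT B =====
-- the `while 62 ** k <= num: k += 1` digit-count loop of B
def pvCountGo (n : Int) (k : Nat) : Nat :=
  if (62 : Int) ^ k ≤ n then pvCountGo n (k + 1) else k
termination_by n.toNat + 1 - 62 ^ k
decreasing_by
  rename_i h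
  have h1 : ((62 ^ k : Nat) : Int) ≤ n := by push_cast; exact h
  have h2 : (62 : Nat) ^ k ≤ n.toNat := by omega
  have h3 : (62 : Nat) ^ k < 62 ^ (k + 1) := by
    exact Nat.pow_lt_pow_right (by norm_num) (Nat.lt_succ_self k)
  omega

def pvCount (n : Int) : Nat := pvCountGo n 0

def decimal_to_base62_alt (num : Int) : String :=
  if num ≤ 0 then (if num = 0 then String.ofList [pvChars62.headI] else String.ofList [])
  else
    String.ofList ((List.range (pvCount num)).map fun i =>
      pvDigit (PySem.Int.mod
        (PySem.Int.floordiv num ((62 : Int) ^ (pvCount num - 1 - i))) 62))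

-- ===== PRECONDITION & SPEC =====
def Spec_decimal_to_base62 (num : Int) (out : String) : Prop := out = decimal_to_base62_alt num
instance (num : Int) (out : String) : Decidable (Spec_decimal_to_base62 num out) := by unfold Spec_decimal_to_base62; infer_instance

-- ===== CLAIM (what is proved, stated in full; the proofs are below) =====
def Claim_equal_decimal_to_base62 : Prop := ∀ (num : Int), Dom_decimal_to_base62 num → Spec_decimal_to_base62 num (decimal_to_base62 num)

-- ===== LEMMAS AND PROOFS =====

-- proof-side MSB-first digit list: both ports' results reduce to this
def pvMSB (n : Int) : List Char :=
  if n > 0 then pvMSB (n / 62) ++ [pvDigit (n % 62)] else []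
termination_by n.toNat
decreasing_by
  rename_i h
  omega

-- A's loop, reversed, is the MSB list appended before the reversed accumulator
theorem pvALoop_reverse (num : Int) (acc : List Char) :
    (pvALoop num acc).reverse = pvMSB num ++ acc.reverse := by
  induction num, acc using pvALoop.induct with
  | case1 n acc h ih =>
    rw [pvALoop, if_pos h, ih,
        PySem.Int.floordiv_eq_ediv_of_pos (show (0:Int) < 62 by norm_num),
        PySem.Int.mod_eq_emod_of_pos (show (0:Int) < 62 by norm_num)]
    conv_rhs => rw [pvMSB, if_pos h]
    simp
  | case2 n acc h =>
    rw [pvALoop, if_neg h, pvMSB, if_neg h]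
    simp

-- pvCountGo's result m always satisfies n < 62^m
theorem pvCountGo_gt (n : Int) (k : Nat) : n < (62 : Int) ^ pvCountGo n k := by
  induction k using pvCountGo.induct n with
  | case1 k h ih => rwa [pvCountGo, if_pos h]
  | case2 k h => rw [pvCountGo, if_neg h]; omega

-- if the loop was entered at k, the result m satisfies k < m and 62^(m-1) ≤ n
theorem pvCountGo_lb (n : Int) (k : Nat) (h0 : (62 : Int) ^ k ≤ n) :
    k < pvCountGo n k ∧ (62 : Int) ^ (pvCountGo n k - 1) ≤ n := by
  induction k using pvCountGo.induct n with
  | case1 k h ih =>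
    rw [pvCountGo, if_pos h]
    by_cases h2 : (62 : Int) ^ (k + 1) ≤ n
    · have := ih h2
      exact ⟨by omega, this.2⟩
    · rw [pvCountGo, if_neg h2]
      simpa using h
  | case2 k h => exact absurd h0 h

-- strict monotonicity of 62^· on Int, contrapositive form
theorem pv_pow_lt_pow (a b : Nat) (h : (62 : Int) ^ a < (62 : Int) ^ b) : a < b := by
  by_contra hc
  have : (62 : Int) ^ b ≤ (62 : Int) ^ a :=
    pow_le_pow_right₀ (by norm_num) (by omega)
  omega

-- uniqueness: the digit count is determined by the bracketing powers
theorem pvCount_eq (n : Int) (j : Nat) (h1 : (62 : Int) ^ j ≤ n) (h2 : n < (62 : Int) ^ (j + 1)) :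
    pvCount n = j + 1 := by
  have hgt := pvCountGo_gt n 0
  have hlb := pvCountGo_lb n 0 (by simpa using le_trans (one_le_pow₀ (by norm_num)) h1)
  have ha : j < pvCountGo n 0 := pv_pow_lt_pow _ _ (lt_of_le_of_lt h1 hgt)
  have hb : pvCountGo n 0 - 1 < j + 1 := pv_pow_lt_pow _ _ (lt_of_le_of_lt hlb.2 h2)
  unfold pvCount
  omega

theorem pvCount_one (n : Int) (h1 : 1 ≤ n) (h2 : n < 62) : pvCount n = 1 := by
  simpa using pvCount_eq n 0 (by simpa using h1) (by simpa using h2)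

-- the digit count drops by one under // 62
theorem pvCount_div (n : Int) (h : 62 ≤ n) : pvCount (n / 62) = pvCount n - 1 := by
  obtain ⟨hmgt, hmlb⟩ := pvCountGo_lb n 0 (by simpa using le_trans (by norm_num) h)
  have hgt := pvCountGo_gt n 0
  have hm2 : 2 ≤ pvCountGo n 0 := by
    have : (1 : Nat) < pvCountGo n 0 :=
      pv_pow_lt_pow 1 _ (lt_of_le_of_lt (by simpa using h) hgt)
    omega
  have hlow : (62 : Int) ^ (pvCountGo n 0 - 2) ≤ n / 62 := by
    rw [Int.le_ediv_iff_mul_le (by norm_num)]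
    calc (62:Int) ^ (pvCountGo n 0 - 2) * 62
        = (62:Int) ^ (pvCountGo n 0 - 1) := by
          rw [← pow_succ]; congr 1; omega
      _ ≤ n := hmlb
  have hhigh : n / 62 < (62 : Int) ^ (pvCountGo n 0 - 1) := by
    rw [Int.ediv_lt_iff_lt_mul (by norm_num)]
    calc n < (62:Int) ^ pvCountGo n 0 := hgt
      _ = (62:Int) ^ (pvCountGo n 0 - 1) * 62 := by rw [← pow_succ]; congr 1; omega
  have := pvCount_eq (n / 62) (pvCountGo n 0 - 2) hlow (by
    have : pvCountGo n 0 - 2 + 1 = pvCountGo n 0 - 1 := by omega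
    rwa [this])
  unfold pvCount at *
  omega

-- B's positional extraction equals the MSB digit list
theorem pvB_map_eq (n : Int) (h : 0 < n) :
    (List.range (pvCount n)).map (fun i =>
      pvDigit (PySem.Int.mod
        (PySem.Int.floordiv n ((62 : Int) ^ (pvCount n - 1 - i))) 62)) = pvMSB n := by
  have hgen : ∀ m : Nat, ∀ n : Int, n.toNat ≤ m → 0 < n →
      (List.range (pvCount n)).map (fun i =>
        pvDigit (PySem.Int.mod
          (PySem.Int.floordiv n ((62 : Int) ^ (pvCount n - 1 - i))) 62)) = pvMSB n := by
    intro m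
    induction m with
    | zero => intro n hle hpos; omega
    | succ m ih =>
      intro n hle hpos
      by_cases hbig : 62 ≤ n
      · -- k = pvCount n ≥ 2; split off last index
        have hk2 : 2 ≤ pvCount n := by
          have hgt := pvCountGo_gt n 0
          have : (1 : Nat) < pvCountGo n 0 :=
            pv_pow_lt_pow 1 _ (lt_of_le_of_lt (by simpa using hbig) hgt)
          unfold pvCount; omega
        have hdivc := pvCount_div n hbig
        have hksucc : pvCount n = (pvCount n - 1) + 1 := by omega
        rw [pvMSB, if_pos hpos]
        rw [hksucc, List.range_succ, List.map_append]
        simp only [Nat.add_sub_cancel]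
        congr 1
        · -- the first k-1 digits are the digits of n / 62
          have hdivpos : 0 < n / 62 := by
            have : (1:Int) ≤ n / 62 := by
              rw [Int.le_ediv_iff_mul_le (by norm_num)]; omega
            omega
          have hdivle : (n / 62).toNat ≤ m := by
            have : n / 62 < n := by
              rw [Int.ediv_lt_iff_lt_mul (by norm_num)]; nlinarith
            omega
          rw [← ih (n / 62) hdivle hdivpos, hdivc]
          apply List.map_congr_left
          intro i hi
          have hi' : i < pvCount n - 1 := by simpa using hi
          congr 2
          rw [PySem.Int.floordiv_eq_ediv_of_pos (show (0:Int) < (62:Int) ^ (pvCount n - 1 - i) by positivity),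
              PySem.Int.floordiv_eq_ediv_of_pos (show (0:Int) < (62:Int) ^ (pvCount n - 1 - 1 - i) by positivity)]
          rw [Int.ediv_ediv_of_nonneg (by norm_num)]
          congr 1
          rw [← pow_succ']
          congr 1
          omega
        · -- the last digit is n % 62
          have : pvCount n - 1 - (pvCount n - 1) = 0 := by omega
          simp only [List.map_cons, List.map_nil, this, pow_zero]
          rw [PySem.Int.floordiv_eq_ediv_of_pos (show (0:Int) < 1 by norm_num),
              PySem.Int.mod_eq_emod_of_pos (show (0:Int) < 62 by norm_num)]
          simp
      · -- single digit
        have hk1 : pvCount n = 1 := pvCount_one n (by omega) (by omega)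
        rw [pvMSB, if_pos hpos]
        have hdiv0 : n / 62 = 0 := Int.ediv_eq_zero_of_lt (by omega) (by omega)
        rw [hdiv0, pvMSB, if_neg (by norm_num)]
        rw [hk1]
        simp only [List.range_one, List.map_cons, List.map_nil, Nat.sub_self, pow_zero,
          List.nil_append]
        rw [PySem.Int.floordiv_eq_ediv_of_pos (show (0:Int) < 1 by norm_num),
            PySem.Int.mod_eq_emod_of_pos (show (0:Int) < 62 by norm_num)]
        simp
  exact hgen n.toNat n le_rfl h

-- ===== VERDICT (by name: the statement is the Claim_ definition above) =====
theorem decimal_to_base62_spec : Claim_equal_decimal_to_base62 := by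
  intro num _
  unfold Spec_decimal_to_base62 decimal_to_base62 decimal_to_base62_alt
  by_cases h0 : num = 0
  · simp [h0]
  · rw [if_neg h0]
    by_cases hpos : 0 < num
    · rw [if_neg (by omega), pvB_map_eq num hpos, pvALoop_reverse]
      simp
    · -- num < 0: A's loop never runs
      rw [if_pos (by omega), if_neg h0]
      rw [pvALoop, if_neg (by omega)]
      simp
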